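-- pv_equiv track=rewrite | github.com/jpowerj/dict-lookup | pages/scaling.py | lookup_word_bin
-- ===== SOURCE A (Python) =====
-- def lookup_word_bin(word_query, all_words):
--     low_index = 0
--     high_index = len(all_words) - 1
--     words_checked = []
--     while low_index <= high_index:
--         mid_index = (low_index + high_index) // 2
--         mid_elt = all_words[mid_index]
--         words_checked.append(mid_elt)
--         if word_query < mid_elt:
--             high_index = mid_index - 1
--         elif word_query == mid_elt:
--             return words_checked
--         else:
--             low_index = mid_index + 1
--     return words_checked
-- ===== SOURCE B (Python) =====
-- def lookup_word_bin(word_query, all_words):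
--     def probe(low, high):
--         if low > high:
--             return []
--         mid = (low + high) // 2
--         m = all_words[mid]
--         if word_query == m:
--             return [m]
--         if word_query < m:
--             return [m] + probe(low, mid - 1)
--         return [m] + probe(mid + 1, high)
--     return probe(0, len(all_words) - 1)
-- ===== Notes on version B (the rewrite author's own statement) =====
-- stated objective: alternative
-- what changed: Replaces the iterative while-loop with a mutable accumulator by a recursive divide-and-conquer helper on (low, high) that builds the probe path front-to-back by prepending.
import Mathlib
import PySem

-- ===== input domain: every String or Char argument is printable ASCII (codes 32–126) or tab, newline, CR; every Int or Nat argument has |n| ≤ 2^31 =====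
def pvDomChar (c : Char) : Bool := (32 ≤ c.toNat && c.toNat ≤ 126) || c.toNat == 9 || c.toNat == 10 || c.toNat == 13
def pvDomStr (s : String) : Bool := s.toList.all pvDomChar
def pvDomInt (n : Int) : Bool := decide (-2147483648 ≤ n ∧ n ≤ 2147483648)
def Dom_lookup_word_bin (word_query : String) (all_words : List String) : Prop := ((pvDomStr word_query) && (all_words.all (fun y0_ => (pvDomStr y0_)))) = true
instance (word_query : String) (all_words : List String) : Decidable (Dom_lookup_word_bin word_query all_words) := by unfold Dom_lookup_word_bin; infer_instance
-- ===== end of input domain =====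

-- B replaces A's iterative while-loop with a mutable accumulator by a recursive
-- divide-and-conquer helper on (low, high) that builds the probe path front-to-back.

-- ===== PORT A =====
-- A's while-loop: state (low_index, high_index, words_checked); the 'none' branch of
-- pyGet? is unreachable (low ≤ mid ≤ high stays inside the list) and only makes the
-- recursion total.
def lookupWordBinLoop (word_query : String) (all_words : List String)
    (low_index high_index : Int) (words_checked : List String) : List String :=
  if _h : low_index ≤ high_index then
    let mid_index := PySem.Int.floordiv (low_index + high_index) 2
    match PySem.List.pyGet? all_words mid_index with
    | none => words_checked
    | some mid_elt =>
      let wc := words_checked ++ [mid_elt]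
      if word_query < mid_elt then
        lookupWordBinLoop word_query all_words low_index (mid_index - 1) wc
      else if word_query = mid_elt then
        wc
      else
        lookupWordBinLoop word_query all_words (mid_index + 1) high_index wc
  else
    words_checked
termination_by (high_index + 1 - low_index).toNat
decreasing_by
  · have := PySem.Int.floordiv_two_mid_bounds _h
    omega
  · have := PySem.Int.floordiv_two_mid_bounds _h
    omega

def lookup_word_bin (word_query : String) (all_words : List String) : List String :=
  lookupWordBinLoop word_query all_words 0 ((all_words.length : Int) - 1) []

-- ===== PORT B =====
-- B's recursive helper 'probe(low, high)': the list of probed words, built by prepending.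
def probeWordBin (word_query : String) (all_words : List String) (low high : Int) : List String :=
  if _h : low > high then []
  else
    let mid := PySem.Int.floordiv (low + high) 2
    match PySem.List.pyGet? all_words mid with
    | none => []
    | some m =>
      if word_query = m then [m]
      else if word_query < m then m :: probeWordBin word_query all_words low (mid - 1)
      else m :: probeWordBin word_query all_words (mid + 1) high
termination_by (high + 1 - low).toNat
decreasing_by
  · have := PySem.Int.floordiv_two_mid_bounds (by omega : low ≤ high)
    omega
  · have := PySem.Int.floordiv_two_mid_bounds (by omega : low ≤ high)
    omega

def lookup_word_bin_alt (word_query : String) (all_words : List String) : List String :=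
  probeWordBin word_query all_words 0 ((all_words.length : Int) - 1)

-- ===== PRECONDITION & SPEC =====
def Spec_lookup_word_bin (word_query : String) (all_words : List String) (out : List String) : Prop := out = lookup_word_bin_alt word_query all_words
instance (word_query : String) (all_words : List String) (out : List String) : Decidable (Spec_lookup_word_bin word_query all_words out) := by unfold Spec_lookup_word_bin; infer_instance

-- ===== CLAIM (what is proved, stated in full; the proofs are below) =====
def Claim_equal_lookup_word_bin : Prop := ∀ (word_query : String) (all_words : List String), Dom_lookup_word_bin word_query all_words → Spec_lookup_word_bin word_query all_words (lookup_word_bin word_query all_words)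

-- ===== LEMMAS AND PROOFS =====

-- A's loop from state (low, high, acc) returns acc followed by B's probe list for (low, high).
theorem lookupWordBinLoop_eq_append (word_query : String) (all_words : List String)
    (low high : Int) (acc : List String) :
    lookupWordBinLoop word_query all_words low high acc
      = acc ++ probeWordBin word_query all_words low high := by
  fun_induction lookupWordBinLoop word_query all_words low high acc with
  | case1 low high acc h mid heq =>
      rw [probeWordBin, dif_neg (not_lt.mpr h)]
      simp only [show PySem.Int.floordiv (low + high) 2 = mid from rfl, heq]
      simp
  | case2 low high acc h mid m heq wc hlt ih =>
      rw [probeWordBin, dif_neg (not_lt.mpr h)]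
      simp only [show PySem.Int.floordiv (low + high) 2 = mid from rfl, heq]
      have hne : ¬ word_query = m := fun he => absurd hlt (by simp [he])
      rw [if_neg hne, if_pos hlt, ih]
      simp [wc]
  | case3 low high acc h mid heq wc hnlt =>
      rw [probeWordBin, dif_neg (not_lt.mpr h)]
      simp only [show PySem.Int.floordiv (low + high) 2 = mid from rfl, heq]
      simp [wc]
  | case4 low high acc h mid m heq wc hnlt hne ih =>
      rw [probeWordBin, dif_neg (not_lt.mpr h)]
      simp only [show PySem.Int.floordiv (low + high) 2 = mid from rfl, heq]
      rw [if_neg hne, if_neg hnlt, ih]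
      simp [wc]
  | case5 low high acc h =>
      rw [probeWordBin, dif_pos (lt_of_not_ge h)]
      simp

-- ===== VERDICT (by name: the statement is the Claim_ definition above) =====
theorem lookup_word_bin_spec : Claim_equal_lookup_word_bin := by
  intro word_query all_words _dom
  unfold Spec_lookup_word_bin lookup_word_bin lookup_word_bin_alt
  simpa using lookupWordBinLoop_eq_append word_query all_words 0 ((all_words.length : Int) - 1) []
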